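-- pv_equiv track=rewrite | github.com/LoftSpace/codetree-TILs | 240712/단 한 번의 2048 시도/one-trial-of-2048-game.py | sum_2048
-- ===== SOURCE A (Python) =====
-- def sum_2048(grid, direction):
--   result = [row[:] for row in grid]
--
--   if direction == 'L':
--     for i in range(4):
--       for j in range(0, 3):
--         if result[i][j] == result[i][j+1]:
--           result[i][j] *= 2
--           result[i][j+1] = 0
--   elif direction == 'R':
--     for i in range(4):
--       for j in range(3, 0, -1):
--         if result[i][j] == result[i][j-1]:
--           result[i][j] *= 2
--           result[i][j-1] = 0
--   elif direction == 'U':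
--     for j in range(4):
--       for i in range(0, 3):
--         if result[i][j] == result[i+1][j]:
--           result[i][j] *= 2
--           result[i+1][j] = 0
--   elif direction == 'D':
--     for j in range(4):
--       for i in range(3, 0, -1):
--         if result[i][j] == result[i-1][j]:
--           result[i][j] *= 2
--           result[i-1][j] = 0
--
--   return result
-- ===== SOURCE B (Python) =====
-- def merge_from(h, rest):
--     # h is the current cell; an equal neighbour merges into it and leaves a 0 behind
--     if not rest:
--         return [h]
--     if h == rest[0]:
--         return [2 * h] + merge_from(0, rest[1:])
--     return [h] + merge_from(rest[0], rest[1:])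
--
--
-- def merge_line(line):
--     if not line:
--         return []
--     return merge_from(line[0], line[1:])
--
--
-- def sum_2048(grid, direction):
--     result = [row[:] for row in grid]
--     if direction in ('L', 'R'):
--         rev = direction == 'R'
--         for i in range(4):
--             seg = result[i][:4]
--             if rev:
--                 seg.reverse()
--             seg = merge_line(seg)
--             if rev:
--                 seg.reverse()
--             result[i][:4] = seg
--     elif direction in ('U', 'D'):
--         rev = direction == 'D'
--         for j in range(4):
--             col = [result[i][j] for i in range(4)]
--             if rev:
--                 col.reverse()
--             col = merge_line(col)
--             if rev:
--                 col.reverse()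
--             for i in range(4):
--                 result[i][j] = col[i]
--     return result
-- ===== Notes on version B (the rewrite author's own statement) =====
-- stated objective: simpler
-- what changed: A's four hand-unrolled in-place double loops (one per direction) are replaced by a single recursive merge helper applied per row or per column, with reversal adapters for R/D and a column read/write adapter for U/D.
import Mathlib
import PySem

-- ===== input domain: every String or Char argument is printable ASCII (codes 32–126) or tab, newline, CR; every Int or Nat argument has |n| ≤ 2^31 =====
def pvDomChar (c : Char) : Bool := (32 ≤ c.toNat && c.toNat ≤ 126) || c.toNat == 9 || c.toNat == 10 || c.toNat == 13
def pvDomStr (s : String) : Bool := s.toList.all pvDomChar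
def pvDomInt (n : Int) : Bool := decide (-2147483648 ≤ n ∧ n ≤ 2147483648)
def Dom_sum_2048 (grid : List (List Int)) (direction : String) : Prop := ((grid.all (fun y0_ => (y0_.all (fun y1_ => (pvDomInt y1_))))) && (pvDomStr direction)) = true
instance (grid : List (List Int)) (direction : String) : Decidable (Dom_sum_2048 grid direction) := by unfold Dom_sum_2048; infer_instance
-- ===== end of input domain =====

-- B replaces A's four copies of the in-place double-loop by one recursive merge helper
-- (merge_from/merge_line) applied per row/column via reverse and column adapters
-- (objective: simpler decomposition; same cost). A returns a fresh copy and never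
-- mutates `grid`; B does the same.


-- ===== PORT A =====
-- result[i][j] read / write helpers; total via defaults — Python raises IndexError
-- out of range, and exactly those inputs are excluded by Pre_sum_2048, so the port
-- is exact on Pre_.
def pvGet (g : List (List Int)) (i j : Nat) : Int := (g.getD i []).getD j 0
def pvSet (g : List (List Int)) (i j : Nat) (v : Int) : List (List Int) :=
  g.set i ((g.getD i []).set j v)

def sum_2048 (grid : List (List Int)) (direction : String) : List (List Int) :=
  let result := grid   -- [row[:] for row in grid] : a fresh equal copy
  if direction = "L" then
    [0,1,2,3].foldl (fun r i =>
      [0,1,2].foldl (fun r j =>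
        if pvGet r i j = pvGet r i (j+1) then
          pvSet (pvSet r i j (pvGet r i j * 2)) i (j+1) 0
        else r) r) result
  else if direction = "R" then
    [0,1,2,3].foldl (fun r i =>
      [3,2,1].foldl (fun r j =>
        if pvGet r i j = pvGet r i (j-1) then
          pvSet (pvSet r i j (pvGet r i j * 2)) i (j-1) 0
        else r) r) result
  else if direction = "U" then
    [0,1,2,3].foldl (fun r j =>
      [0,1,2].foldl (fun r i =>
        if pvGet r i j = pvGet r (i+1) j then
          pvSet (pvSet r i j (pvGet r i j * 2)) (i+1) j 0
        else r) r) result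
  else if direction = "D" then
    [0,1,2,3].foldl (fun r j =>
      [3,2,1].foldl (fun r i =>
        if pvGet r i j = pvGet r (i-1) j then
          pvSet (pvSet r i j (pvGet r i j * 2)) (i-1) j 0
        else r) r) result
  else result

-- ===== PORT B =====

-- ===== PORT B =====
def merge_from (h : Int) : List Int → List Int
  | [] => [h]
  | y :: rest => if h = y then (2 * h) :: merge_from 0 rest else h :: merge_from y rest

def merge_line (line : List Int) : List Int :=
  match line with
  | [] => []
  | x :: rest => merge_from x rest

def sum_2048_alt (grid : List (List Int)) (direction : String) : List (List Int) :=
  let result := grid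
  if direction = "L" ∨ direction = "R" then
    let rev := direction = "R"
    [0,1,2,3].foldl (fun r i =>
      let row := r.getD i []
      let seg := row.take 4
      let seg := if rev then seg.reverse else seg
      let seg := merge_line seg
      let seg := if rev then seg.reverse else seg
      r.set i (seg ++ row.drop 4)) result   -- result[i][:4] = seg (rows have ≥ 4 entries on Pre_)
  else if direction = "U" ∨ direction = "D" then
    let rev := direction = "D"
    [0,1,2,3].foldl (fun r j =>
      let col := [0,1,2,3].map (fun i => pvGet r i j)
      let col := if rev then col.reverse else col
      let col := merge_line col
      let col := if rev then col.reverse else col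
      [0,1,2,3].foldl (fun r i => pvSet r i j (col.getD i 0)) r) result
  else result

-- ===== PRECONDITION & SPEC =====
-- Pre_ excludes exactly the inputs on which A raises IndexError: a merge direction
-- ('L','R','U','D') with fewer than 4 rows, or one of the first 4 rows shorter than 4.
def Pre_sum_2048 (grid : List (List Int)) (direction : String) : Prop :=
  (direction = "L" ∨ direction = "R" ∨ direction = "U" ∨ direction = "D") →
    4 ≤ grid.length ∧ ∀ row ∈ grid.take 4, 4 ≤ row.length
instance (grid : List (List Int)) (direction : String) : Decidable (Pre_sum_2048 grid direction) := by unfold Pre_sum_2048; infer_instance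

def pvWitness_sum_2048 : List (List Int) × String :=
  ([[2,2,0,4],[4,0,0,4],[2,2,2,2],[0,0,8,8]], "L")

def Spec_sum_2048 (grid : List (List Int)) (direction : String) (out : List (List Int)) : Prop := out = sum_2048_alt grid direction
instance (grid : List (List Int)) (direction : String) (out : List (List Int)) : Decidable (Spec_sum_2048 grid direction out) := by unfold Spec_sum_2048; infer_instance

-- ===== CLAIM (what is proved, stated in full; the proofs are below) =====
def Claim_equal_sum_2048 : Prop := ∀ (grid : List (List Int)) (direction : String), Dom_sum_2048 grid direction → Pre_sum_2048 grid direction → Spec_sum_2048 grid direction (sum_2048 grid direction)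

-- ===== LEMMAS AND PROOFS =====
lemma pv_getD_set_self {α : Type} (l : List α) (i : Nat) (v d : α) (h : i < l.length) :
    (l.set i v).getD i d = v := by
  simp [List.getD_eq_getElem?_getD, h]

lemma pv_set_getD {α : Type} (l : List α) (i : Nat) (d : α) (h : i < l.length) :
    l.set i (l.getD i d) = l := by
  rw [List.getD_eq_getElem l d h]; exact List.set_getElem_self h

def stepLrow (j : Nat) (r : List Int) : List Int :=
  if r.getD j 0 = r.getD (j+1) 0 then (r.set j (r.getD j 0 * 2)).set (j+1) 0 else r

lemma stepL_set (g : List (List Int)) (i j : Nat) (hi : i < g.length) :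
    (if pvGet g i j = pvGet g i (j+1) then pvSet (pvSet g i j (pvGet g i j * 2)) i (j+1) 0 else g)
      = g.set i (stepLrow j (g.getD i [])) := by
  unfold pvGet pvSet stepLrow
  by_cases h : (g.getD i []).getD j 0 = (g.getD i []).getD (j+1) 0
  · rw [if_pos h, if_pos h, pv_getD_set_self _ _ _ _ hi, List.set_set]
  · rw [if_neg h, if_neg h]
    exact (pv_set_getD _ _ _ hi).symm

lemma innerL_eq (g : List (List Int)) (i : Nat) (hi : i < g.length) :
    [0,1,2].foldl (fun r j => if pvGet r i j = pvGet r i (j+1) then pvSet (pvSet r i j (pvGet r i j * 2)) i (j+1) 0 else r) g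
      = g.set i (stepLrow 2 (stepLrow 1 (stepLrow 0 (g.getD i [])))) := by
  simp only [List.foldl_cons, List.foldl_nil]
  rw [stepL_set g i 0 hi]
  rw [stepL_set _ i 1 (by simpa using hi)]
  rw [pv_getD_set_self _ _ _ _ hi, List.set_set]
  rw [stepL_set _ i 2 (by simpa using hi)]
  rw [pv_getD_set_self _ _ _ _ hi, List.set_set]

lemma rowL_merge (r : List Int) (h : 4 ≤ r.length) :
    stepLrow 2 (stepLrow 1 (stepLrow 0 r)) = merge_line (r.take 4) ++ r.drop 4 := by
  match r, h with
  | a :: b :: c :: d :: t, _ =>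
    show stepLrow 2 (stepLrow 1 (stepLrow 0 (a::b::c::d::t))) = merge_line [a,b,c,d] ++ t
    by_cases h1 : a = b
    · subst h1
      by_cases h2 : (0:Int) = c
      · subst h2
        by_cases h3 : (0:Int) = d
        · subst h3; simp [stepLrow, merge_line, merge_from, *, mul_comm]
        · simp [stepLrow, merge_line, merge_from, *, mul_comm]
      · by_cases h3 : c = d
        · subst h3; simp [stepLrow, merge_line, merge_from, *, mul_comm]
        · simp [stepLrow, merge_line, merge_from, *, mul_comm]
    · by_cases h2 : b = c
      · subst h2
        by_cases h3 : (0:Int) = d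
        · subst h3; simp [stepLrow, merge_line, merge_from, *, mul_comm]
        · simp [stepLrow, merge_line, merge_from, *, mul_comm]
      · by_cases h3 : c = d
        · subst h3; simp [stepLrow, merge_line, merge_from, *, mul_comm]
        · simp [stepLrow, merge_line, merge_from, *, mul_comm]

lemma colU_A (r0 r1 r2 r3 : List Int) (rest : List (List Int)) (j : Nat)
    (h0 : j < r0.length) (h1 : j < r1.length) (h2 : j < r2.length) (h3 : j < r3.length) :
    [0,1,2].foldl (fun r i => if pvGet r i j = pvGet r (i+1) j then pvSet (pvSet r i j (pvGet r i j * 2)) (i+1) j 0 else r) (r0::r1::r2::r3::rest)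
      = r0.set j ((merge_line [r0.getD j 0, r1.getD j 0, r2.getD j 0, r3.getD j 0]).getD 0 0)
        :: r1.set j ((merge_line [r0.getD j 0, r1.getD j 0, r2.getD j 0, r3.getD j 0]).getD 1 0)
        :: r2.set j ((merge_line [r0.getD j 0, r1.getD j 0, r2.getD j 0, r3.getD j 0]).getD 2 0)
        :: r3.set j ((merge_line [r0.getD j 0, r1.getD j 0, r2.getD j 0, r3.getD j 0]).getD 3 0)
        :: rest := by
  simp only [List.foldl_cons, List.foldl_nil, pvGet, pvSet]
  simp only [List.getD_cons_zero, List.getD_cons_succ, List.set_cons_zero, List.set_cons_succ, List.set_set, pv_getD_set_self _ _ _ _ h0, pv_getD_set_self _ _ _ _ h1, pv_getD_set_self _ _ _ _ h2, pv_getD_set_self _ _ _ _ h3]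
  by_cases c1 : r0.getD j 0 = r1.getD j 0
  · rw [if_pos c1]
    simp only [List.getD_cons_zero, List.getD_cons_succ, List.set_cons_zero, List.set_cons_succ, List.set_set, pv_getD_set_self _ _ _ _ h0, pv_getD_set_self _ _ _ _ h1, pv_getD_set_self _ _ _ _ h2, pv_getD_set_self _ _ _ _ h3]
    by_cases c2 : (0:Int) = r2.getD j 0
    · rw [if_pos c2]
      simp only [List.getD_cons_zero, List.getD_cons_succ, List.set_cons_zero, List.set_cons_succ, List.set_set, pv_getD_set_self _ _ _ _ h0, pv_getD_set_self _ _ _ _ h1, pv_getD_set_self _ _ _ _ h2, pv_getD_set_self _ _ _ _ h3]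
      by_cases c3 : (0:Int) = r3.getD j 0
      · rw [if_pos c3]
        simp only [merge_line, merge_from]
        rw [if_pos c1, if_pos c2, if_pos c3]
        simp [pv_set_getD, h0, h1, h2, h3, mul_comm, List.set_set]
      · rw [if_neg c3]
        simp only [merge_line, merge_from]
        rw [if_pos c1, if_pos c2, if_neg c3]
        simp [pv_set_getD, h0, h1, h2, h3, mul_comm, List.set_set]
    · rw [if_neg c2]
      simp only [List.getD_cons_zero, List.getD_cons_succ, List.set_cons_zero, List.set_cons_succ, List.set_set, pv_getD_set_self _ _ _ _ h0, pv_getD_set_self _ _ _ _ h1, pv_getD_set_self _ _ _ _ h2, pv_getD_set_self _ _ _ _ h3]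
      by_cases c3 : r2.getD j 0 = r3.getD j 0
      · rw [if_pos c3]
        simp only [merge_line, merge_from]
        rw [if_pos c1, if_neg c2, if_pos c3]
        simp [pv_set_getD, h0, h1, h2, h3, mul_comm, List.set_set]
      · rw [if_neg c3]
        simp only [merge_line, merge_from]
        rw [if_pos c1, if_neg c2, if_neg c3]
        simp [pv_set_getD, h0, h1, h2, h3, mul_comm, List.set_set]
  · rw [if_neg c1]
    simp only [List.getD_cons_zero, List.getD_cons_succ, List.set_cons_zero, List.set_cons_succ, List.set_set, pv_getD_set_self _ _ _ _ h0, pv_getD_set_self _ _ _ _ h1, pv_getD_set_self _ _ _ _ h2, pv_getD_set_self _ _ _ _ h3]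
    by_cases c2 : r1.getD j 0 = r2.getD j 0
    · rw [if_pos c2]
      simp only [List.getD_cons_zero, List.getD_cons_succ, List.set_cons_zero, List.set_cons_succ, List.set_set, pv_getD_set_self _ _ _ _ h0, pv_getD_set_self _ _ _ _ h1, pv_getD_set_self _ _ _ _ h2, pv_getD_set_self _ _ _ _ h3]
      by_cases c3 : (0:Int) = r3.getD j 0
      · rw [if_pos c3]
        simp only [merge_line, merge_from]
        rw [if_neg c1, if_pos c2, if_pos c3]
        simp [pv_set_getD, h0, h1, h2, h3, mul_comm, List.set_set]
      · rw [if_neg c3]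
        simp only [merge_line, merge_from]
        rw [if_neg c1, if_pos c2, if_neg c3]
        simp [pv_set_getD, h0, h1, h2, h3, mul_comm, List.set_set]
    · rw [if_neg c2]
      simp only [List.getD_cons_zero, List.getD_cons_succ, List.set_cons_zero, List.set_cons_succ, List.set_set, pv_getD_set_self _ _ _ _ h0, pv_getD_set_self _ _ _ _ h1, pv_getD_set_self _ _ _ _ h2, pv_getD_set_self _ _ _ _ h3]
      by_cases c3 : r2.getD j 0 = r3.getD j 0
      · rw [if_pos c3]
        simp only [merge_line, merge_from]
        rw [if_neg c1, if_neg c2, if_pos c3]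
        simp [pv_set_getD, h0, h1, h2, h3, mul_comm, List.set_set]
      · rw [if_neg c3]
        simp only [merge_line, merge_from]
        rw [if_neg c1, if_neg c2, if_neg c3]
        simp [pv_set_getD, h0, h1, h2, h3, mul_comm, List.set_set]

def stepRrow (j : Nat) (r : List Int) : List Int :=
  if r.getD j 0 = r.getD (j-1) 0 then (r.set j (r.getD j 0 * 2)).set (j-1) 0 else r

lemma stepR_set (g : List (List Int)) (i j : Nat) (hi : i < g.length) :
    (if pvGet g i j = pvGet g i (j-1) then pvSet (pvSet g i j (pvGet g i j * 2)) i (j-1) 0 else g)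
      = g.set i (stepRrow j (g.getD i [])) := by
  unfold pvGet pvSet stepRrow
  by_cases h : (g.getD i []).getD j 0 = (g.getD i []).getD (j-1) 0
  · rw [if_pos h, if_pos h, pv_getD_set_self _ _ _ _ hi, List.set_set]
  · rw [if_neg h, if_neg h]
    exact (pv_set_getD _ _ _ hi).symm

lemma innerR_eq (g : List (List Int)) (i : Nat) (hi : i < g.length) :
    [3,2,1].foldl (fun r j => if pvGet r i j = pvGet r i (j-1) then pvSet (pvSet r i j (pvGet r i j * 2)) i (j-1) 0 else r) g
      = g.set i (stepRrow 1 (stepRrow 2 (stepRrow 3 (g.getD i [])))) := by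
  simp only [List.foldl_cons, List.foldl_nil]
  rw [stepR_set g i 3 hi]
  rw [stepR_set _ i 2 (by simpa using hi)]
  rw [pv_getD_set_self _ _ _ _ hi, List.set_set]
  rw [stepR_set _ i 1 (by simpa using hi)]
  rw [pv_getD_set_self _ _ _ _ hi, List.set_set]

lemma rowR_merge (r : List Int) (h : 4 ≤ r.length) :
    stepRrow 1 (stepRrow 2 (stepRrow 3 r)) = (merge_line (r.take 4).reverse).reverse ++ r.drop 4 := by
  match r, h with
  | a :: b :: c :: d :: t, _ =>
    show stepRrow 1 (stepRrow 2 (stepRrow 3 (a::b::c::d::t)))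
      = (merge_line [a,b,c,d].reverse).reverse ++ t
    by_cases h1 : d = c
    · subst h1
      by_cases h2 : (0:Int) = b
      · subst h2
        by_cases h3 : (0:Int) = a
        · subst h3; simp [stepRrow, merge_line, merge_from, *, mul_comm]
        · simp [stepRrow, merge_line, merge_from, *, mul_comm]
      · by_cases h3 : b = a
        · subst h3; simp [stepRrow, merge_line, merge_from, *, mul_comm]
        · simp [stepRrow, merge_line, merge_from, *, mul_comm]
    · by_cases h2 : c = b
      · subst h2
        by_cases h3 : (0:Int) = a
        · subst h3; simp [stepRrow, merge_line, merge_from, *, mul_comm]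
        · simp [stepRrow, merge_line, merge_from, *, mul_comm]
      · by_cases h3 : b = a
        · subst h3; simp [stepRrow, merge_line, merge_from, *, mul_comm]
        · simp [stepRrow, merge_line, merge_from, *, mul_comm]

lemma colD_A (r0 r1 r2 r3 : List Int) (rest : List (List Int)) (j : Nat)
    (h0 : j < r0.length) (h1 : j < r1.length) (h2 : j < r2.length) (h3 : j < r3.length) :
    [3,2,1].foldl (fun r i => if pvGet r i j = pvGet r (i-1) j then pvSet (pvSet r i j (pvGet r i j * 2)) (i-1) j 0 else r) (r0::r1::r2::r3::rest)
      = r0.set j (((merge_line [r3.getD j 0, r2.getD j 0, r1.getD j 0, r0.getD j 0]).reverse).getD 0 0)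
        :: r1.set j (((merge_line [r3.getD j 0, r2.getD j 0, r1.getD j 0, r0.getD j 0]).reverse).getD 1 0)
        :: r2.set j (((merge_line [r3.getD j 0, r2.getD j 0, r1.getD j 0, r0.getD j 0]).reverse).getD 2 0)
        :: r3.set j (((merge_line [r3.getD j 0, r2.getD j 0, r1.getD j 0, r0.getD j 0]).reverse).getD 3 0)
        :: rest := by
  simp only [List.foldl_cons, List.foldl_nil, pvGet, pvSet]
  simp only [Nat.reduceSub, List.getD_cons_zero, List.getD_cons_succ, List.set_cons_zero, List.set_cons_succ, List.set_set, pv_getD_set_self _ _ _ _ h0, pv_getD_set_self _ _ _ _ h1, pv_getD_set_self _ _ _ _ h2, pv_getD_set_self _ _ _ _ h3]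
  by_cases c1 : r3.getD j 0 = r2.getD j 0
  · rw [if_pos c1]
    simp only [Nat.reduceSub, List.getD_cons_zero, List.getD_cons_succ, List.set_cons_zero, List.set_cons_succ, List.set_set, pv_getD_set_self _ _ _ _ h0, pv_getD_set_self _ _ _ _ h1, pv_getD_set_self _ _ _ _ h2, pv_getD_set_self _ _ _ _ h3]
    by_cases c2 : (0:Int) = r1.getD j 0
    · rw [if_pos c2]
      simp only [Nat.reduceSub, List.getD_cons_zero, List.getD_cons_succ, List.set_cons_zero, List.set_cons_succ, List.set_set, pv_getD_set_self _ _ _ _ h0, pv_getD_set_self _ _ _ _ h1, pv_getD_set_self _ _ _ _ h2, pv_getD_set_self _ _ _ _ h3]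
      by_cases c3 : (0:Int) = r0.getD j 0
      · rw [if_pos c3]
        simp only [merge_line, merge_from]
        rw [if_pos c1, if_pos c2, if_pos c3]
        simp [pv_set_getD, h0, h1, h2, h3, mul_comm, List.set_set]
      · rw [if_neg c3]
        simp only [merge_line, merge_from]
        rw [if_pos c1, if_pos c2, if_neg c3]
        simp [pv_set_getD, h0, h1, h2, h3, mul_comm, List.set_set]
    · rw [if_neg c2]
      simp only [Nat.reduceSub, List.getD_cons_zero, List.getD_cons_succ, List.set_cons_zero, List.set_cons_succ, List.set_set, pv_getD_set_self _ _ _ _ h0, pv_getD_set_self _ _ _ _ h1, pv_getD_set_self _ _ _ _ h2, pv_getD_set_self _ _ _ _ h3]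
      by_cases c3 : r1.getD j 0 = r0.getD j 0
      · rw [if_pos c3]
        simp only [merge_line, merge_from]
        rw [if_pos c1, if_neg c2, if_pos c3]
        simp [pv_set_getD, h0, h1, h2, h3, mul_comm, List.set_set]
      · rw [if_neg c3]
        simp only [merge_line, merge_from]
        rw [if_pos c1, if_neg c2, if_neg c3]
        simp [pv_set_getD, h0, h1, h2, h3, mul_comm, List.set_set]
  · rw [if_neg c1]
    simp only [Nat.reduceSub, List.getD_cons_zero, List.getD_cons_succ, List.set_cons_zero, List.set_cons_succ, List.set_set, pv_getD_set_self _ _ _ _ h0, pv_getD_set_self _ _ _ _ h1, pv_getD_set_self _ _ _ _ h2, pv_getD_set_self _ _ _ _ h3]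
    by_cases c2 : r2.getD j 0 = r1.getD j 0
    · rw [if_pos c2]
      simp only [Nat.reduceSub, List.getD_cons_zero, List.getD_cons_succ, List.set_cons_zero, List.set_cons_succ, List.set_set, pv_getD_set_self _ _ _ _ h0, pv_getD_set_self _ _ _ _ h1, pv_getD_set_self _ _ _ _ h2, pv_getD_set_self _ _ _ _ h3]
      by_cases c3 : (0:Int) = r0.getD j 0
      · rw [if_pos c3]
        simp only [merge_line, merge_from]
        rw [if_neg c1, if_pos c2, if_pos c3]
        simp [pv_set_getD, h0, h1, h2, h3, mul_comm, List.set_set]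
      · rw [if_neg c3]
        simp only [merge_line, merge_from]
        rw [if_neg c1, if_pos c2, if_neg c3]
        simp [pv_set_getD, h0, h1, h2, h3, mul_comm, List.set_set]
    · rw [if_neg c2]
      simp only [Nat.reduceSub, List.getD_cons_zero, List.getD_cons_succ, List.set_cons_zero, List.set_cons_succ, List.set_set, pv_getD_set_self _ _ _ _ h0, pv_getD_set_self _ _ _ _ h1, pv_getD_set_self _ _ _ _ h2, pv_getD_set_self _ _ _ _ h3]
      by_cases c3 : r1.getD j 0 = r0.getD j 0
      · rw [if_pos c3]
        simp only [merge_line, merge_from]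
        rw [if_neg c1, if_neg c2, if_pos c3]
        simp [pv_set_getD, h0, h1, h2, h3, mul_comm, List.set_set]
      · rw [if_neg c3]
        simp only [merge_line, merge_from]
        rw [if_neg c1, if_neg c2, if_neg c3]
        simp [pv_set_getD, h0, h1, h2, h3, mul_comm, List.set_set]

lemma rows_len (g : List (List Int)) (hg : 4 ≤ g.length)
    (hr : ∀ r ∈ g.take 4, 4 ≤ r.length) (i : Nat) (hi : i < 4) :
    4 ≤ (g.getD i []).length := by
  have hil : i < g.length := by omega
  have htl : i < (g.take 4).length := by simp [List.length_take]; omega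
  have hm : (g.take 4)[i]'htl ∈ g.take 4 := List.getElem_mem htl
  rw [List.getElem_take] at hm
  rw [List.getD_eq_getElem g [] hil]
  exact hr _ hm


lemma merge_from_length (h : Int) : ∀ l : List Int, (merge_from h l).length = l.length + 1 := by
  intro l
  induction l generalizing h with
  | nil => simp [merge_from]
  | cons y rest ih => simp only [merge_from]; split_ifs <;> simp [ih]

lemma merge_line_length : ∀ l : List Int, (merge_line l).length = l.length := by
  intro l
  cases l <;> simp [merge_line, merge_from_length]

lemma foldl_inner_norm (inner : List (List Int) → Nat → List (List Int)) (F : List Int → List Int)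
    (h : ∀ g i, i < g.length → inner g i = g.set i (F (g.getD i []))) :
    ∀ (idx : List Nat) (g : List (List Int)), (∀ i ∈ idx, i < g.length) →
      idx.foldl inner g = idx.foldl (fun r i => r.set i (F (r.getD i []))) g := by
  intro idx
  induction idx with
  | nil => intro g _; rfl
  | cons i idx ih =>
    intro g hmem
    simp only [List.foldl_cons]
    rw [h g i (hmem i (by simp))]
    exact ih _ (fun x hx => by simpa using hmem x (by simp [hx]))

lemma foldl_set_congr (fA fB : List Int → List Int)
    (hstep : ∀ r : List Int, 4 ≤ r.length → fA r = fB r)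
    (hlen : ∀ r : List Int, 4 ≤ r.length → 4 ≤ (fB r).length) :
    ∀ (idx : List Nat) (g : List (List Int)), (∀ i ∈ idx, i < 4) → 4 ≤ g.length →
      (∀ r ∈ g.take 4, 4 ≤ r.length) →
      idx.foldl (fun r i => r.set i (fA (r.getD i []))) g
        = idx.foldl (fun r i => r.set i (fB (r.getD i []))) g := by
  intro idx
  induction idx with
  | nil => intro g _ _ _; rfl
  | cons i idx ih =>
    intro g hmem hg hr
    simp only [List.foldl_cons]
    have hi4 : i < 4 := hmem i (by simp)
    have hrl := rows_len g hg hr i hi4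
    rw [hstep _ hrl]
    refine ih _ (fun x hx => hmem x (by simp [hx])) (by simpa using hg) ?_
    intro r hmem2
    rw [List.take_set] at hmem2
    rcases List.mem_or_eq_of_mem_set hmem2 with h' | h'
    · exact hr _ h'
    · subst h'; exact hlen _ hrl

lemma main_L (g : List (List Int)) (hg : 4 ≤ g.length)
    (hr : ∀ r ∈ g.take 4, 4 ≤ r.length) :
    sum_2048 g "L" = sum_2048_alt g "L" := by
  unfold sum_2048 sum_2048_alt
  simp only [String.reduceEq, if_true, if_false, or_false, or_self]
  rw [foldl_inner_norm _ (fun r => stepLrow 2 (stepLrow 1 (stepLrow 0 r)))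
    (fun g' i hi => innerL_eq g' i hi) [0,1,2,3] g (fun i hi => by
      have : i < 4 := by simpa using (by simpa using hi : i = 0 ∨ i = 1 ∨ i = 2 ∨ i = 3).elim (by omega) (fun h => by omega)
      omega)]
  exact foldl_set_congr _ _ (fun r h => rowL_merge r h)
    (fun r h => by simp [merge_line_length]; omega)
    [0,1,2,3] g (by simp) hg hr

lemma main_R (g : List (List Int)) (hg : 4 ≤ g.length)
    (hr : ∀ r ∈ g.take 4, 4 ≤ r.length) :
    sum_2048 g "R" = sum_2048_alt g "R" := by
  unfold sum_2048 sum_2048_alt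
  simp only [String.reduceEq, if_true, if_false, false_or, or_self]
  rw [foldl_inner_norm _ (fun r => stepRrow 1 (stepRrow 2 (stepRrow 3 r)))
    (fun g' i hi => innerR_eq g' i hi) [0,1,2,3] g (fun i hi => by
      have : i < 4 := by simpa using (by simpa using hi : i = 0 ∨ i = 1 ∨ i = 2 ∨ i = 3).elim (by omega) (fun h => by omega)
      omega)]
  exact foldl_set_congr _ _ (fun r h => rowR_merge r h)
    (fun r h => by simp [merge_line_length]; omega)
    [0,1,2,3] g (by simp) hg hr


lemma colU_B (r0 r1 r2 r3 : List Int) (rest : List (List Int)) (j : Nat) :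
    [0,1,2,3].foldl (fun r_1 i => pvSet r_1 i j ((merge_line (List.map (fun i => pvGet (r0::r1::r2::r3::rest) i j) [0,1,2,3])).getD i 0)) (r0::r1::r2::r3::rest)
      = r0.set j ((merge_line [r0.getD j 0, r1.getD j 0, r2.getD j 0, r3.getD j 0]).getD 0 0)
        :: r1.set j ((merge_line [r0.getD j 0, r1.getD j 0, r2.getD j 0, r3.getD j 0]).getD 1 0)
        :: r2.set j ((merge_line [r0.getD j 0, r1.getD j 0, r2.getD j 0, r3.getD j 0]).getD 2 0)
        :: r3.set j ((merge_line [r0.getD j 0, r1.getD j 0, r2.getD j 0, r3.getD j 0]).getD 3 0)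
        :: rest := by
  simp only [List.map_cons, List.map_nil, List.foldl_cons, List.foldl_nil, pvGet, pvSet,
    List.getD_cons_zero, List.getD_cons_succ, List.set_cons_zero, List.set_cons_succ,
    List.set_set]

lemma colD_B (r0 r1 r2 r3 : List Int) (rest : List (List Int)) (j : Nat) :
    [0,1,2,3].foldl (fun r_1 i => pvSet r_1 i j (((merge_line (List.map (fun i => pvGet (r0::r1::r2::r3::rest) i j) [0,1,2,3]).reverse).reverse).getD i 0)) (r0::r1::r2::r3::rest)
      = r0.set j (((merge_line [r3.getD j 0, r2.getD j 0, r1.getD j 0, r0.getD j 0]).reverse).getD 0 0)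
        :: r1.set j (((merge_line [r3.getD j 0, r2.getD j 0, r1.getD j 0, r0.getD j 0]).reverse).getD 1 0)
        :: r2.set j (((merge_line [r3.getD j 0, r2.getD j 0, r1.getD j 0, r0.getD j 0]).reverse).getD 2 0)
        :: r3.set j (((merge_line [r3.getD j 0, r2.getD j 0, r1.getD j 0, r0.getD j 0]).reverse).getD 3 0)
        :: rest := by
  simp only [List.map_cons, List.map_nil, List.foldl_cons, List.foldl_nil, pvGet, pvSet,
    List.getD_cons_zero, List.getD_cons_succ, List.set_cons_zero, List.set_cons_succ,
    List.set_set, List.reverse_cons, List.reverse_nil, List.nil_append, List.cons_append,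
    List.append_nil]

lemma foldUD (stepA stepB : List (List Int) → Nat → List (List Int))
    (hstep : ∀ (r0 r1 r2 r3 : List Int) (rest : List (List Int)) (j : Nat),
      j < r0.length → j < r1.length → j < r2.length → j < r3.length →
      ∃ s0 s1 s2 s3, stepA (r0::r1::r2::r3::rest) j = s0::s1::s2::s3::rest
        ∧ stepB (r0::r1::r2::r3::rest) j = s0::s1::s2::s3::rest
        ∧ s0.length = r0.length ∧ s1.length = r1.length ∧ s2.length = r2.length ∧ s3.length = r3.length) :
    ∀ (idx : List Nat) (r0 r1 r2 r3 : List Int) (rest : List (List Int)),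
      (∀ j ∈ idx, j < 4) → 4 ≤ r0.length → 4 ≤ r1.length → 4 ≤ r2.length → 4 ≤ r3.length →
      idx.foldl stepA (r0::r1::r2::r3::rest) = idx.foldl stepB (r0::r1::r2::r3::rest) := by
  intro idx
  induction idx with
  | nil => intro _ _ _ _ _ _ _ _ _ _; rfl
  | cons j idx ih =>
    intro r0 r1 r2 r3 rest hmem h0 h1 h2 h3
    have hj : j < 4 := hmem j (by simp)
    obtain ⟨s0, s1, s2, s3, hA, hB, l0, l1, l2, l3⟩ :=
      hstep r0 r1 r2 r3 rest j (by omega) (by omega) (by omega) (by omega)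
    simp only [List.foldl_cons]
    rw [hA, hB]
    exact ih s0 s1 s2 s3 rest (fun x hx => hmem x (by simp [hx]))
      (by omega) (by omega) (by omega) (by omega)

lemma main_U (g : List (List Int)) (hg : 4 ≤ g.length)
    (hr : ∀ r ∈ g.take 4, 4 ≤ r.length) :
    sum_2048 g "U" = sum_2048_alt g "U" := by
  unfold sum_2048 sum_2048_alt
  simp only [String.reduceEq, if_true, if_false, or_false, or_self]
  rcases g with _ | ⟨r0, _ | ⟨r1, _ | ⟨r2, _ | ⟨r3, rest⟩⟩⟩⟩ <;> try (simp at hg)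
  have h0 : 4 ≤ r0.length := hr _ (by simp)
  have h1 : 4 ≤ r1.length := hr _ (by simp)
  have h2 : 4 ≤ r2.length := hr _ (by simp)
  have h3 : 4 ≤ r3.length := hr _ (by simp)
  refine foldUD _ _ ?_ [0,1,2,3] r0 r1 r2 r3 rest (by simp) h0 h1 h2 h3
  intro r0 r1 r2 r3 rest j hj0 hj1 hj2 hj3
  refine ⟨_, _, _, _, colU_A r0 r1 r2 r3 rest j hj0 hj1 hj2 hj3, colU_B r0 r1 r2 r3 rest j,
    by simp, by simp, by simp, by simp⟩

lemma main_D (g : List (List Int)) (hg : 4 ≤ g.length)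
    (hr : ∀ r ∈ g.take 4, 4 ≤ r.length) :
    sum_2048 g "D" = sum_2048_alt g "D" := by
  unfold sum_2048 sum_2048_alt
  simp only [String.reduceEq, if_true, if_false, or_false, false_or, or_self]
  rcases g with _ | ⟨r0, _ | ⟨r1, _ | ⟨r2, _ | ⟨r3, rest⟩⟩⟩⟩ <;> try (simp at hg)
  have h0 : 4 ≤ r0.length := hr _ (by simp)
  have h1 : 4 ≤ r1.length := hr _ (by simp)
  have h2 : 4 ≤ r2.length := hr _ (by simp)
  have h3 : 4 ≤ r3.length := hr _ (by simp)
  refine foldUD _ _ ?_ [0,1,2,3] r0 r1 r2 r3 rest (by simp) h0 h1 h2 h3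
  intro r0 r1 r2 r3 rest j hj0 hj1 hj2 hj3
  refine ⟨_, _, _, _, colD_A r0 r1 r2 r3 rest j hj0 hj1 hj2 hj3, ?_, by simp, by simp, by simp, by simp⟩
  exact colD_B r0 r1 r2 r3 rest j

-- ===== VERDICT (by name: the statement is the Claim_ definition above) =====
theorem sum_2048_spec : Claim_equal_sum_2048 := by
  intro grid direction hdom hpre
  unfold Spec_sum_2048
  by_cases hL : direction = "L"
  · subst hL
    obtain ⟨hg, hr⟩ := hpre (Or.inl rfl)
    exact main_L grid hg hr
  · by_cases hR : direction = "R"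
    · subst hR
      obtain ⟨hg, hr⟩ := hpre (by simp)
      exact main_R grid hg hr
    · by_cases hU : direction = "U"
      · subst hU
        obtain ⟨hg, hr⟩ := hpre (by simp)
        exact main_U grid hg hr
      · by_cases hD : direction = "D"
        · subst hD
          obtain ⟨hg, hr⟩ := hpre (by simp)
          exact main_D grid hg hr
        · simp [sum_2048, sum_2048_alt, hL, hR, hU, hD]
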